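-- pv_equiv track=rewrite | github.com/Jsaunders20/Dyslexia-Suite | dyslexia_editor.py | highlight_text_vowels
-- ===== SOURCE A (Python) =====
-- def highlight_text_vowels(text):
--     """
--     Process text to identify and mark vowels for highlighting.
--
--     Args:
--         text (str): The input text to process
--
--     Returns:
--         list: Pairs of (text_segment, is_vowel) indicating which segments to highlight
--     """
--     segments = []
--     current = ""
--
--     for char in text:
--         if char.lower() in 'aeiou':
--             if current:
--                 segments.append((current, False))
--                 current = ""
--             segments.append((char, True))
--         else:
--             current += char
--
--     if current:
--         segments.append((current, False))
--
--     return segments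
-- ===== SOURCE B (Python) =====
-- import re
--
-- def highlight_text_vowels(text):
--     """Regex tokenization: single vowels and maximal non-vowel runs, then tag each token."""
--     return [(t, t in 'aeiouAEIOU')
--             for t in re.findall(r'[aeiouAEIOU]|[^aeiouAEIOU]+', text)]
-- ===== Notes on version B (the rewrite author's own statement) =====
-- stated objective: idiomatic
-- what changed: Replaces the explicit buffer-and-flush character loop with a single regex findall that tokenizes the text into single vowels and maximal non-vowel runs, then maps each token to (token, is_vowel).
import Mathlib
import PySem

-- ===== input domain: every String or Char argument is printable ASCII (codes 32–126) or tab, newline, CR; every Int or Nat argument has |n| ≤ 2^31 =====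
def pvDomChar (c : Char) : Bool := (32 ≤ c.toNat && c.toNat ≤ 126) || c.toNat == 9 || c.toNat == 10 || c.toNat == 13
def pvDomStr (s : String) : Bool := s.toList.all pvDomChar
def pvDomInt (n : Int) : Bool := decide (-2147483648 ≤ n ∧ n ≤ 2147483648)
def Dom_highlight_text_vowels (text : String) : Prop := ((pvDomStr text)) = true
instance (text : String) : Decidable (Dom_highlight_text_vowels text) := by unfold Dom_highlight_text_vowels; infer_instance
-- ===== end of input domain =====

-- B replaces A's buffer-and-flush character loop with regex-style tokenization
-- (single vowels | maximal non-vowel runs) followed by a map; objective: idiomatic.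


-- ===== PORT A =====
-- char.lower() in 'aeiou'  (substring test on a 1-char string)
def pvVowelA (c : Char) : Bool := PySem.Chars.isIn (PySem.Chars.lower [c]) "aeiou".toList

-- the for-loop of A, state = (segments, current)
def pvALoop : List (String × Bool) → List Char → List Char → List (String × Bool)
  | segs, cur, [] => if cur.isEmpty then segs else segs ++ [(String.ofList cur, false)]
  | segs, cur, c :: rest =>
      if pvVowelA c then
        pvALoop ((if cur.isEmpty then segs else segs ++ [(String.ofList cur, false)])
                  ++ [(String.ofList [c], true)]) [] rest
      else
        pvALoop segs (cur ++ [c]) rest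

def highlight_text_vowels (text : String) : List (String × Bool) :=
  pvALoop [] [] text.toList

-- ===== PORT B =====
-- regex character class [aeiouAEIOU]
def pvVowelB (c : Char) : Bool := "aeiouAEIOU".toList.contains c

-- hand port of re.findall(r'[aeiouAEIOU]|[^aeiouAEIOU]+', text): exact — the regex scans
-- left to right, emitting a single vowel char or a maximal run of non-vowel chars.
def pvTokenize : List Char → List (List Char)
  | [] => []
  | c :: rest =>
      if pvVowelB c then [c] :: pvTokenize rest
      else ((c :: rest).takeWhile (fun x => !pvVowelB x))
             :: pvTokenize ((c :: rest).dropWhile (fun x => !pvVowelB x))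
  termination_by l => l.length
  decreasing_by
    · simp
    · simp only [List.dropWhile_cons]
      simp only [Bool.not_eq_true'] at *
      simp_all
      exact List.length_dropWhile_le _ _

-- t in 'aeiouAEIOU'  (substring test)
def highlight_text_vowels_alt (text : String) : List (String × Bool) :=
  (pvTokenize text.toList).map
    (fun t => (String.ofList t, PySem.Chars.isIn t "aeiouAEIOU".toList))

-- ===== PRECONDITION & SPEC =====
def Spec_highlight_text_vowels (text : String) (out : List (String × Bool)) : Prop := out = highlight_text_vowels_alt text
instance (text : String) (out : List (String × Bool)) : Decidable (Spec_highlight_text_vowels text out) := by unfold Spec_highlight_text_vowels; infer_instance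

-- ===== CLAIM (what is proved, stated in full; the proofs are below) =====
def Claim_equal_highlight_text_vowels : Prop := ∀ (text : String), Dom_highlight_text_vowels text → Spec_highlight_text_vowels text (highlight_text_vowels text)

-- ===== LEMMAS AND PROOFS =====

-- the two vowel tests agree on the domain's characters
theorem pvVowel_eq (c : Char) (h : pvDomChar c = true) : pvVowelA c = pvVowelB c := by
  have key : ∀ n : Nat, n < 127 → pvVowelA (Char.ofNat n) = pvVowelB (Char.ofNat n) := by decide
  have hlt : c.toNat < 127 := by
    simp only [pvDomChar, Bool.or_eq_true, Bool.and_eq_true, decide_eq_true_eq,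
      beq_iff_eq] at h
    omega
  have := key c.toNat hlt
  simpa [Char.ofNat_toNat] using this

theorem pv_singleton_infix {α : Type} (a : α) (l : List α) : [a] <:+: l ↔ a ∈ l := by
  constructor
  · intro h; exact h.sublist.subset (List.mem_singleton_self a)
  · intro h
    obtain ⟨s, t, rfl⟩ := List.append_of_mem h
    exact ⟨s, t, by simp⟩

theorem pv_isIn_single (c : Char) :
    PySem.Chars.isIn [c] ['a', 'e', 'i', 'o', 'u', 'A', 'E', 'I', 'O', 'U'] = pvVowelB c := by
  rcases hb : pvVowelB c with _ | _
  · rw [PySem.Chars.isIn_eq_false_iff, pv_singleton_infix]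
    intro hmem
    have : pvVowelB c = true := by simpa [pvVowelB] using hmem
    simp [this] at hb
  · rw [PySem.Chars.isIn_iff_infix, pv_singleton_infix]
    simpa [pvVowelB] using hb

theorem pv_isIn_run (t : List Char) (hne : t ≠ [])
    (hall : ∀ x ∈ t, pvVowelB x = false) :
    PySem.Chars.isIn t ['a', 'e', 'i', 'o', 'u', 'A', 'E', 'I', 'O', 'U'] = false := by
  rw [PySem.Chars.isIn_eq_false_iff]
  intro hinf
  cases t with
  | nil => exact hne rfl
  | cons d ds =>
    have hd : d ∈ ['a', 'e', 'i', 'o', 'u', 'A', 'E', 'I', 'O', 'U'] :=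
      hinf.sublist.subset (by simp)
    have : pvVowelB d = true := by simpa [pvVowelB] using hd
    simp [hall d (by simp)] at this

theorem pv_takeWhile_all {α : Type} (p : α → Bool) (l1 l2 : List α)
    (h : ∀ x ∈ l1, p x = true) :
    (l1 ++ l2).takeWhile p = l1 ++ l2.takeWhile p := by
  induction l1 with
  | nil => simp
  | cons a l ih =>
    simp only [List.cons_append, List.takeWhile_cons, h a (by simp)]
    simp [ih (fun x hx => h x (by simp [hx]))]

theorem pv_dropWhile_all {α : Type} (p : α → Bool) (l1 l2 : List α)
    (h : ∀ x ∈ l1, p x = true) :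
    (l1 ++ l2).dropWhile p = l2.dropWhile p := by
  induction l1 with
  | nil => simp
  | cons a l ih =>
    simp only [List.cons_append, List.dropWhile_cons, h a (by simp)]
    exact ih (fun x hx => h x (by simp [hx]))

-- pulling the accumulated segments out of A's loop
theorem pvALoop_segs (l : List Char) :
    ∀ segs cur, pvALoop segs cur l = segs ++ pvALoop [] cur l := by
  induction l with
  | nil => intro segs cur; by_cases h : cur.isEmpty <;> simp [pvALoop, h]
  | cons c rest ih =>
    intro segs cur
    by_cases hv : pvVowelA c = true
    · simp only [pvALoop, hv, if_true]
      rw [ih, ih ((if cur.isEmpty then ([] : List (String × Bool))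
            else [] ++ [(String.ofList cur, false)]) ++ [(String.ofList [c], true)])]
      by_cases h : cur.isEmpty <;> simp [h]
    · have hv' : pvVowelA c = false := by simpa using hv
      simp only [pvALoop, hv', Bool.false_eq_true, if_false]
      exact ih segs (cur ++ [c])

def pvTag (t : List Char) : String × Bool :=
  (String.ofList t, PySem.Chars.isIn t "aeiouAEIOU".toList)

-- a pending all-non-vowel buffer `cur` followed by the rest of the input produces
-- exactly the tagged tokens of cur ++ l
theorem pvALoop_tok (l : List Char) :
    ∀ cur, (∀ x ∈ cur, pvVowelB x = false) → (∀ x ∈ l, pvDomChar x = true) →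
      pvALoop [] cur l = (pvTokenize (cur ++ l)).map pvTag := by
  induction l with
  | nil =>
    intro cur hcur _
    cases cur with
    | nil => simp [pvALoop, pvTokenize]
    | cons d ds =>
      have hd := hcur d (by simp)
      have htw := pv_takeWhile_all (fun x => !pvVowelB x) (d :: ds) []
        (fun x hx => by simp [hcur x hx])
      have hdw := pv_dropWhile_all (fun x => !pvVowelB x) (d :: ds) []
        (fun x hx => by simp [hcur x hx])
      simp only [List.append_nil, List.takeWhile_nil, List.dropWhile_nil] at htw hdw
      rw [List.append_nil]
      rw [pvTokenize, if_neg (by simp [hd]), htw, hdw]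
      simp [pvALoop, pvTokenize, pvTag, pv_isIn_run (d :: ds) (by simp) hcur]
  | cons c rest ih =>
    intro cur hcur hdom
    have hA : pvVowelA c = pvVowelB c := pvVowel_eq c (hdom c (by simp))
    have hdomr : ∀ x ∈ rest, pvDomChar x = true := fun x hx => hdom x (by simp [hx])
    have hrec : pvALoop [] [] rest = (pvTokenize rest).map pvTag := by
      simpa using ih [] (by simp) hdomr
    by_cases hv : pvVowelB c = true
    · -- vowel: flush cur (if nonempty), emit the vowel, continue fresh
      have hAt : pvVowelA c = true := by rw [hA]; exact hv
      cases cur with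
      | nil =>
        simp only [pvALoop, hAt, if_true, List.isEmpty_nil, List.nil_append]
        rw [pvALoop_segs, hrec]
        rw [pvTokenize, if_pos hv]
        simp [pvTag, pv_isIn_single, hv]
      | cons d ds =>
        have hd := hcur d (by simp)
        have htw := pv_takeWhile_all (fun x => !pvVowelB x) (d :: ds) (c :: rest)
          (fun x hx => by simp [hcur x hx])
        have hdw := pv_dropWhile_all (fun x => !pvVowelB x) (d :: ds) (c :: rest)
          (fun x hx => by simp [hcur x hx])
        rw [List.takeWhile_cons, if_neg (by simp [hv])] at htw
        rw [List.dropWhile_cons, if_neg (by simp [hv])] at hdw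
        simp only [List.append_nil] at htw
        simp only [pvALoop, hAt, if_true, List.isEmpty_cons, Bool.false_eq_true, if_false]
        rw [pvALoop_segs, hrec]
        rw [show (d :: ds) ++ c :: rest = d :: (ds ++ c :: rest) from rfl]
        rw [pvTokenize, if_neg (by simp [hd])]
        rw [show List.takeWhile (fun x => !pvVowelB x) (d :: (ds ++ c :: rest))
              = ((d :: ds) ++ c :: rest).takeWhile (fun x => !pvVowelB x) from rfl, htw]
        rw [show List.dropWhile (fun x => !pvVowelB x) (d :: (ds ++ c :: rest))
              = ((d :: ds) ++ c :: rest).dropWhile (fun x => !pvVowelB x) from rfl, hdw]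
        rw [pvTokenize, if_pos hv]
        simp [pvTag, pv_isIn_single, hv, pv_isIn_run (d :: ds) (by simp) hcur]
    · -- non-vowel: extend the buffer
      have hv' : pvVowelB c = false := by simpa using hv
      have hAf : pvVowelA c = false := by rw [hA]; exact hv'
      have hcur' : ∀ x ∈ cur ++ [c], pvVowelB x = false := by
        intro x hx
        rcases List.mem_append.1 hx with h | h
        · exact hcur x h
        · simp at h; simpa [h] using hv'
      simp only [pvALoop, hAf, Bool.false_eq_true, if_false]
      rw [ih (cur ++ [c]) hcur' hdomr]
      simp

-- ===== VERDICT (by name: the statement is the Claim_ definition above) =====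
theorem highlight_text_vowels_spec : Claim_equal_highlight_text_vowels := by
  intro text hdom
  unfold Spec_highlight_text_vowels highlight_text_vowels highlight_text_vowels_alt
  have hall : ∀ x ∈ text.toList, pvDomChar x = true := by
    have := hdom
    simpa [Dom_highlight_text_vowels, pvDomStr, List.all_eq_true] using this
  have := pvALoop_tok text.toList [] (by simp) hall
  simpa [pvTag] using this
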